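-- pv_equiv track=rewrite | github.com/crash-and-compile/dc32-problems | american-medium/generator.py | is_american
-- ===== SOURCE A (Python) =====
-- def is_american(number):
--     number = int(number)
--
--     def convert_to_base(n, b):
--         digits = []
--         while n > 0:
--             digits.append(n % b)
--             n = n // b
--         return digits[::-1]  # Reverse to match the order from highest to lowest place value
--
--     # Check all bases from 2 to 10
--     for base in range(2, 11):
--         digits = convert_to_base(number, base)
--         # Check if the digits form a strictly increasing sequence where each digit is exactly 1 greater than the previous
--         if len(digits) > 1 and all(digits[i] + 1 == digits[i + 1] for i in range(len(digits) - 1)):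
--             return True
--     return False
-- ===== SOURCE B (Python) =====
-- def is_american(number):
--     number = int(number)
--     # generate-and-compare: enumerate every consecutive-run value per base
--     for b in range(2, 11):
--         for d in range(1, b):
--             v = d
--             for nxt in range(d + 1, b):
--                 v = v * b + nxt
--                 if v == number:
--                     return True
--     return False
-- ===== Notes on version B (the rewrite author's own statement) =====
-- stated objective: alternative
-- what changed: Instead of converting the number to each base and pattern-checking its digit string, B enumerates every consecutive-digit candidate value (base 2..10, start digit, length) with Horner accumulation and compares it to the number; no base conversion or digit scan is performed.
import Mathlib
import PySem

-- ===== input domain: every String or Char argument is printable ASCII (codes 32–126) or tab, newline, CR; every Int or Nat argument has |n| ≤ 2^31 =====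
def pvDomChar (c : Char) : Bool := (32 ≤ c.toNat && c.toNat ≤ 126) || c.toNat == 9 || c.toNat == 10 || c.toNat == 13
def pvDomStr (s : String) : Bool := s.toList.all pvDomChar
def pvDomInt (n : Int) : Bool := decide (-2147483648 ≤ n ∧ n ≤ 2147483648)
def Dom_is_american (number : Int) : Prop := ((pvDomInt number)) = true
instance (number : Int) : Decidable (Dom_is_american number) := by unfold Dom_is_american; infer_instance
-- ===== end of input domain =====

-- B changes the algorithm: instead of converting the number to each base and scanning its
-- digits, it enumerates every consecutive-digit candidate value per base and compares
-- (objective: alternative; not claimed faster).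

-- ===== PORT A =====
-- while n > 0: digits.append(n % b); n = n // b   — fuel-encoded (fuel = n.toNat suffices: n strictly decreases)
def convLoop : Nat → Int → Int → List Int
  | 0, _, _ => []
  | f+1, n, b => if 0 < n then PySem.Int.mod n b :: convLoop f (PySem.Int.floordiv n b) b else []

def convert_to_base (n b : Int) : List Int :=
  (convLoop n.toNat n b).reverse  -- digits[::-1]

def is_american (number : Int) : Bool :=
  -- number = int(number) is the identity on an int argument
  (PySem.List.pyRange 2 11 1).any fun base =>
    let digits := convert_to_base number base
    decide (1 < digits.length) &&
      ((PySem.List.pyRange 0 ((digits.length : Int) - 1) 1).all fun i =>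
        PySem.List.pyGetD digits i 0 + 1 == PySem.List.pyGetD digits (i+1) 0)

-- ===== PORT B =====
-- inner loop: for nxt in range(d+1, b): v = v*b + nxt; if v == number: return True
def innerLoop (number b v : Int) : List Int → Bool
  | [] => false
  | nxt :: rest =>
      let v' := v * b + nxt
      if v' == number then true else innerLoop number b v' rest

def is_american_alt (number : Int) : Bool :=
  (PySem.List.pyRange 2 11 1).any fun b =>
    (PySem.List.pyRange 1 b 1).any fun d =>
      innerLoop number b d (PySem.List.pyRange (d+1) b 1)

-- ===== PRECONDITION & SPEC =====
def Spec_is_american (number : Int) (out : Bool) : Prop := out = is_american_alt number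
instance (number : Int) (out : Bool) : Decidable (Spec_is_american number out) := by unfold Spec_is_american; infer_instance

-- ===== CLAIM (what is proved, stated in full; the proofs are below) =====
def Claim_equal_is_american : Prop := ∀ (number : Int), Dom_is_american number → Spec_is_american number (is_american number)

-- ===== LEMMAS AND PROOFS =====

-- the consecutive run d, d+1, …, d+k-1
def run (d : Int) : Nat → List Int
  | 0 => []
  | k+1 => d :: run (d+1) k

-- value of an LSB-first digit list in base b
def valL (b : Int) : List Int → Int
  | [] => 0
  | x :: r => x + b * valL b r

-- MSB-first Horner value (what both programs compute)
def fromD (b : Int) (D : List Int) : Int := D.foldl (fun a x => a * b + x) 0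

-- common characterization: n is a consecutive-run number in base b
def IsRun (b n : Int) : Prop :=
  ∃ (d : Int) (k : Nat), 1 ≤ d ∧ 2 ≤ k ∧ d + k ≤ b ∧ n = fromD b (run d k)

theorem run_length (d : Int) (k : Nat) : (run d k).length = k := by
  induction k generalizing d with
  | zero => rfl
  | succ k ih => simp [run, ih]

theorem run_getD (d : Int) (k i : Nat) (h : i < k) : (run d k).getD i 0 = d + i := by
  induction k generalizing d i with
  | zero => omega
  | succ k ih =>
    cases i with
    | zero => simp [run]
    | succ i =>
      show (run (d+1) k).getD i 0 = d + ↑(i+1)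
      rw [ih (d+1) i (by omega)]; push_cast; ring

theorem mem_run (x d : Int) (k : Nat) : x ∈ run d k ↔ d ≤ x ∧ x < d + k := by
  induction k generalizing d with
  | zero => simp [run]
  | succ k ih =>
    simp only [run, List.mem_cons, ih]
    push_cast
    constructor
    · rintro (rfl | ⟨h1, h2⟩) <;> omega
    · rintro ⟨h1, h2⟩
      rcases eq_or_lt_of_le h1 with rfl | h1'
      · left; rfl
      · right; omega

theorem head?_run (d : Int) (k : Nat) (h : 1 ≤ k) : (run d k).head? = some d := by
  cases k with
  | zero => omega
  | succ k => rfl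

theorem pyRange_eq_run (a c : Int) : PySem.List.pyRange a c 1 = run a (c - a).toNat := by
  have key : ∀ (m : Nat) (a : Int), (c - a).toNat = m → PySem.List.pyRange a c 1 = run a m := by
    intro m
    induction m with
    | zero => intro a h; rw [PySem.List.pyRange_one_eq_nil (by omega)]; rfl
    | succ m ih =>
      intro a h
      rw [PySem.List.pyRange_one_cons (by omega)]
      simp only [run]
      rw [ih (a+1) (by omega)]
  exact key _ a rfl

theorem valL_nonneg (b : Int) (hb : 0 ≤ b) (L : List Int) (h : ∀ x ∈ L, 0 ≤ x) : 0 ≤ valL b L := by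
  induction L with
  | nil => simp [valL]
  | cons x r ih =>
    have := h x (by simp)
    have hr := ih (fun y hy => h y (by simp [hy]))
    have : 0 ≤ b * valL b r := mul_nonneg hb hr
    simp only [valL]; omega

theorem valL_pos (b : Int) (hb : 2 ≤ b) (L : List Int) (h : ∀ x ∈ L, 0 ≤ x)
    (hl : ∀ x, L.getLast? = some x → 0 < x) (hne : L ≠ []) : 0 < valL b L := by
  induction L with
  | nil => exact absurd rfl hne
  | cons x r ih =>
    have hx : 0 ≤ x := h x (by simp)
    cases r with
    | nil =>
      have hx0 : 0 < x := hl x rfl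
      simp only [valL]; omega
    | cons y r' =>
      have hvr : 0 < valL b (y :: r') := by
        refine ih (fun z hz => h z (by simp [List.mem_cons] at hz ⊢; tauto))
          (fun z hz => hl z (by rw [List.getLast?_cons_cons]; exact hz)) (by simp)
      have h2v : 2 * valL b (y :: r') ≤ b * valL b (y :: r') :=
        mul_le_mul_of_nonneg_right hb hvr.le
      show 0 < x + b * valL b (y :: r')
      omega

theorem fromD_reverse (b : Int) (L : List Int) : fromD b L.reverse = valL b L := by
  rw [fromD, List.foldl_reverse]
  induction L with
  | nil => rfl
  | cons x r ih => simp only [List.foldr_cons, valL, ih]; ring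

theorem convLoop_nonpos (f : Nat) (n b : Int) (h : n ≤ 0) : convLoop f n b = [] := by
  cases f
  · rfl
  · simp [convLoop]; omega

theorem conv_spec (fuel : Nat) (n b : Int) (hb : 2 ≤ b) (hn : 0 < n) (hf : n.toNat ≤ fuel) :
    valL b (convLoop fuel n b) = n ∧ (∀ x ∈ convLoop fuel n b, 0 ≤ x ∧ x < b) ∧
    (∀ x, (convLoop fuel n b).getLast? = some x → 0 < x) := by
  induction fuel generalizing n with
  | zero => omega
  | succ f ih =>
    have hb0 : (0:Int) < b := by omega
    simp only [convLoop, if_pos hn]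
    rw [PySem.Int.mod_eq_emod_of_pos hb0, PySem.Int.floordiv_eq_ediv_of_pos hb0]
    have hr0 : 0 ≤ n % b := Int.emod_nonneg n (by omega)
    have hrb : n % b < b := Int.emod_lt_of_pos n hb0
    have hqn : n % b + b * (n / b) = n := Int.emod_add_mul_ediv n b
    have hq0 : 0 ≤ n / b := Int.ediv_nonneg hn.le hb0.le
    rcases eq_or_lt_of_le hq0 with hq | hq
    · -- n / b = 0
      rw [convLoop_nonpos f (n / b) b (by omega)]
      have e0 : b * (n / b) = 0 := by rw [← hq, mul_zero]
      have hrn : n % b = n := by omega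
      refine ⟨by simp [valL]; omega, ?_, ?_⟩
      · intro x hx; simp at hx; omega
      · intro x hx; simp at hx; omega
    · -- 0 < n / b
      have hlt : n / b < n := by
        nlinarith
      have hf' : (n / b).toNat ≤ f := by omega
      obtain ⟨ih1, ih2, ih3⟩ := ih (n / b) hq hf'
      have hrest_ne : convLoop f (n / b) b ≠ [] := by
        cases f with
        | zero => omega
        | succ f' => simp only [convLoop, if_pos hq]; exact List.cons_ne_nil _ _
      refine ⟨by simp [valL, ih1]; omega, ?_, ?_⟩
      · intro x hx
        rcases List.mem_cons.mp hx with rfl | hx'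
        · exact ⟨hr0, hrb⟩
        · exact ih2 x hx'
      · intro x hx
        obtain ⟨y, t, ht⟩ := List.exists_cons_of_ne_nil hrest_ne
        rw [ht, List.getLast?_cons_cons] at hx
        exact ih3 x (by rw [ht]; exact hx)

theorem conv_unique (b : Int) (hb : 2 ≤ b) (L : List Int)
    (hd : ∀ x ∈ L, 0 ≤ x ∧ x < b) (hl : ∀ x, L.getLast? = some x → 0 < x)
    (fuel : Nat) (hf : (valL b L).toNat ≤ fuel) : convLoop fuel (valL b L) b = L := by
  induction L generalizing fuel with
  | nil => exact convLoop_nonpos fuel _ b (by simp [valL])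
  | cons x r ih =>
    have hx := hd x (by simp)
    have hb0 : (0:Int) < b := by omega
    have hr_nonneg : 0 ≤ valL b r := valL_nonneg b (by omega) r (fun y hy => (hd y (by simp [hy])).1)
    cases r with
    | nil =>
      have hx0 : 0 < x := hl x rfl
      have hv : valL b [x] = x := by simp [valL]
      rw [hv]
      cases fuel with
      | zero => omega
      | succ f =>
        simp only [convLoop, if_pos hx0]
        rw [PySem.Int.mod_eq_emod_of_pos hb0, PySem.Int.floordiv_eq_ediv_of_pos hb0,
          Int.emod_eq_of_lt hx.1 hx.2, Int.ediv_eq_zero_of_lt hx.1 hx.2,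
          convLoop_nonpos f 0 b le_rfl]
    | cons y r' =>
      have hvr : 0 < valL b (y :: r') := by
        refine valL_pos b hb _ (fun z hz => (hd z (by simp [List.mem_cons] at hz ⊢; tauto)).1)
          (fun z hz => hl z (by rw [List.getLast?_cons_cons]; exact hz)) (by simp)
      have h2v : 2 * valL b (y :: r') ≤ b * valL b (y :: r') :=
        mul_le_mul_of_nonneg_right hb hvr.le
      have hn_pos : 0 < valL b (x :: y :: r') := by simp only [valL] at *; omega
      have hn_ge : valL b (y :: r') + 1 ≤ valL b (x :: y :: r') := by
        simp only [valL] at *; omega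
      cases fuel with
      | zero => omega
      | succ f =>
        simp only [convLoop, if_pos hn_pos]
        rw [PySem.Int.mod_eq_emod_of_pos hb0, PySem.Int.floordiv_eq_ediv_of_pos hb0]
        have hsplit : valL b (x :: y :: r') = x + b * valL b (y :: r') := rfl
        rw [hsplit, Int.add_mul_emod_self_left, Int.emod_eq_of_lt hx.1 hx.2,
          Int.add_mul_ediv_left x _ (by omega : b ≠ 0), Int.ediv_eq_zero_of_lt hx.1 hx.2,
          zero_add]
        rw [ih (fun z hz => hd z (by simp [hz])) (fun z hz => hl z (by rw [List.getLast?_cons_cons]; exact hz)) f (by omega)]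

-- A's index-based all-loop as a Nat-indexed chain condition
theorem chain_iff (D : List Int) :
    (((PySem.List.pyRange 0 ((D.length : Int) - 1) 1).all fun i =>
      PySem.List.pyGetD D i 0 + 1 == PySem.List.pyGetD D (i+1) 0) = true) ↔
    ∀ j : Nat, j + 1 < D.length → D.getD j 0 + 1 = D.getD (j+1) 0 := by
  rw [List.all_eq_true]
  constructor
  · intro h j hj
    have := h (j : Int) (PySem.List.mem_pyRange_one.mpr ⟨by omega, by omega⟩)
    rw [beq_iff_eq] at this
    have e1 : ((j : Int) + 1) = ((j + 1 : Nat) : Int) := by push_cast; ring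
    rw [e1, PySem.List.pyGetD_natCast, PySem.List.pyGetD_natCast] at this
    exact this
  · intro h i hi
    obtain ⟨h0, h1⟩ := PySem.List.mem_pyRange_one.mp hi
    obtain ⟨j, rfl⟩ := Int.eq_ofNat_of_zero_le h0
    rw [beq_iff_eq]
    have e1 : ((j : Int) + 1) = ((j + 1 : Nat) : Int) := by push_cast; ring
    rw [e1, PySem.List.pyGetD_natCast, PySem.List.pyGetD_natCast]
    exact h j (by omega)

-- a chain-checked list of length ≥ 2 is exactly a consecutive run
theorem run_iff (D : List Int) :
    (1 < D.length ∧ ∀ j : Nat, j + 1 < D.length → D.getD j 0 + 1 = D.getD (j+1) 0) ↔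
    ∃ (d : Int) (k : Nat), 2 ≤ k ∧ D = run d k := by
  constructor
  · rintro ⟨hlen, hchain⟩
    refine ⟨D.getD 0 0, D.length, by omega, ?_⟩
    have key : ∀ j, j < D.length → D.getD j 0 = D.getD 0 0 + j := by
      intro j
      induction j with
      | zero => intro _; simp
      | succ j ih =>
        intro hj
        rw [← hchain j (by omega), ih (by omega)]
        push_cast; ring
    apply List.ext_getElem (by rw [run_length])
    intro i h1 h2
    rw [← List.getD_eq_getElem D 0 h1, ← List.getD_eq_getElem (run _ _) 0 h2,
      run_getD _ _ _ (by rwa [run_length] at h2), key i h1]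
  · rintro ⟨d, k, hk, rfl⟩
    rw [run_length]
    refine ⟨by omega, ?_⟩
    intro j hj
    rw [run_getD d k j (by omega), run_getD d k (j+1) (by omega)]
    push_cast; ring

-- A's per-base check, characterized
theorem acheck_iff (b n : Int) (hb : 2 ≤ b) :
    ((decide (1 < (convert_to_base n b).length) &&
      ((PySem.List.pyRange 0 (((convert_to_base n b).length : Int) - 1) 1).all fun i =>
        PySem.List.pyGetD (convert_to_base n b) i 0 + 1 ==
          PySem.List.pyGetD (convert_to_base n b) (i+1) 0)) = true) ↔ IsRun b n := by
  constructor
  · intro h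
    rw [Bool.and_eq_true, decide_eq_true_iff] at h
    obtain ⟨hlen, hall⟩ := h
    obtain ⟨d, k, hk, hD⟩ := (run_iff _).mp ⟨hlen, (chain_iff _).mp hall⟩
    have hn : 0 < n := by
      by_contra hn'
      rw [convert_to_base, convLoop_nonpos _ n b (by omega)] at hlen
      simp at hlen
    obtain ⟨hval, hbnd, hlast⟩ := conv_spec n.toNat n b hb hn le_rfl
    have hfrom : fromD b (convert_to_base n b) = n := by
      rw [convert_to_base, fromD_reverse, hval]
    have hhead : (convert_to_base n b).head? = some d := by
      rw [hD, head?_run d k (by omega)]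
    have hd1 : 1 ≤ d := by
      rw [convert_to_base, List.head?_reverse] at hhead
      exact hlast d hhead
    have hlastmem : d + (k - 1 : Int) ∈ convert_to_base n b := by
      rw [hD, mem_run]; omega
    have hdb : d + (k - 1 : Int) < b := by
      rw [convert_to_base, List.mem_reverse] at hlastmem
      exact (hbnd _ hlastmem).2
    exact ⟨d, k, hd1, hk, by omega, by rw [← hfrom, hD]⟩
  · rintro ⟨d, k, hd1, hk2, hdkb, hn⟩
    have hmemL : ∀ x ∈ (run d k).reverse, 0 ≤ x ∧ x < b := by
      intro x hx
      rw [List.mem_reverse, mem_run] at hx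
      omega
    have hlastL : ∀ x, ((run d k).reverse.getLast? = some x) → 0 < x := by
      intro x hx
      rw [List.getLast?_reverse, head?_run d k (by omega)] at hx
      injection hx with hx'
      omega
    have hv : valL b (run d k).reverse = n := by
      rw [← fromD_reverse, List.reverse_reverse, hn]
    have hDeq : convert_to_base n b = run d k := by
      rw [convert_to_base, ← hv,
        conv_unique b hb _ hmemL hlastL _ (by rw [hv]), List.reverse_reverse]
    obtain ⟨hlen, hch⟩ := (run_iff (run d k)).mpr ⟨d, k, hk2, rfl⟩
    rw [Bool.and_eq_true, decide_eq_true_iff, hDeq]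
    exact ⟨hlen, (chain_iff _).mpr hch⟩

-- B's inner loop, characterized
theorem inner_iff (m : Nat) (s v n b : Int) :
    innerLoop n b v (run s m) = true ↔
      ∃ i : Nat, 1 ≤ i ∧ i ≤ m ∧ List.foldl (fun a x => a * b + x) v (run s i) = n := by
  induction m generalizing s v with
  | zero =>
    simp only [run, innerLoop]
    constructor
    · intro h; cases h
    · rintro ⟨i, h1, h2, _⟩; omega
  | succ m ih =>
    simp only [run, innerLoop]
    by_cases hv : v * b + s = n
    · simp only [hv, beq_self_eq_true, if_true]
      constructor
      · intro _
        exact ⟨1, le_refl 1, by omega, by simp [run, List.foldl, hv]⟩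
      · intro _; trivial
    · rw [if_neg (by simpa using hv), ih]
      constructor
      · rintro ⟨i, h1, h2, h3⟩
        exact ⟨i + 1, by omega, by omega, by simpa [run, List.foldl] using h3⟩
      · rintro ⟨i, h1, h2, h3⟩
        cases i with
        | zero => omega
        | succ i =>
          cases i with
          | zero => exact absurd (by simpa [run, List.foldl] using h3) hv
          | succ i =>
            exact ⟨i + 1, by omega, by omega, by simpa [run, List.foldl] using h3⟩

-- B's per-base check, characterized
theorem fromD_run_succ (b d : Int) (i : Nat) :
    fromD b (run d (i+1)) = List.foldl (fun a x => a * b + x) d (run (d+1) i) := by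
  simp only [fromD, run, List.foldl_cons, zero_mul, zero_add]

-- B's per-base check, characterized
theorem bcheck_iff (b n : Int) :
    (((PySem.List.pyRange 1 b 1).any fun d =>
        innerLoop n b d (PySem.List.pyRange (d+1) b 1)) = true) ↔ IsRun b n := by
  rw [List.any_eq_true]
  constructor
  · rintro ⟨d, hd, h⟩
    obtain ⟨hd1, hdb⟩ := PySem.List.mem_pyRange_one.mp hd
    rw [pyRange_eq_run, inner_iff] at h
    obtain ⟨i, hi1, hi2, hfold⟩ := h
    refine ⟨d, i + 1, hd1, by omega, by omega, ?_⟩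
    rw [fromD_run_succ]
    exact hfold.symm
  · rintro ⟨d, k, hd1, hk2, hdkb, hn⟩
    obtain ⟨k', rfl⟩ : ∃ k', k = k' + 1 := ⟨k - 1, by omega⟩
    push_cast at hdkb
    refine ⟨d, PySem.List.mem_pyRange_one.mpr ⟨hd1, by omega⟩, ?_⟩
    rw [pyRange_eq_run, inner_iff]
    refine ⟨k', by omega, by omega, ?_⟩
    rw [hn, fromD_run_succ]

-- ===== VERDICT (by name: the statement is the Claim_ definition above) =====
theorem any_congr_mem (l : List Int) (p q : Int → Bool) (h : ∀ x ∈ l, p x = q x) :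
    l.any p = l.any q := by
  induction l with
  | nil => rfl
  | cons a t ih => simp only [List.any_cons, h a (by simp), ih (fun x hx => h x (by simp [hx]))]

theorem is_american_spec : Claim_equal_is_american := by
  intro number _
  unfold Spec_is_american
  simp only [is_american, is_american_alt]
  apply any_congr_mem
  intro b hmem
  have hb : 2 ≤ b := ((PySem.List.mem_pyRange_one).mp hmem).1
  rw [Bool.eq_iff_iff]
  exact (acheck_iff b number hb).trans (bcheck_iff b number).symm
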